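-- pv_equiv track=rewrite | github.com/arrhes/PCG | scripts/pdf2md.py | _merge_styled_runs
-- ===== SOURCE A (Python) =====
-- def _wrap_style(text: str, *, bold: bool, italic: bool) -> str:
--     """Wrap *text* with Markdown bold/italic markers."""
--     if bold and italic:
--         return f"***{text}***"
--     if bold:
--         return f"**{text}**"
--     if italic:
--         return f"*{text}*"
--     return text
--
-- def _merge_styled_runs(
--     runs: list[tuple[str, bool, bool]],
-- ) -> str:
--     """Merge consecutive runs sharing the same (bold, italic) style.
--
--     Each *run* is ``(text, is_bold, is_italic)``.  Adjacent runs with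
--     identical style flags are concatenated before Markdown markers are
--     applied, avoiding artefacts like ``**C****HAPITRE**``.
--     """
--     if not runs:
--         return ""
--
--     groups: list[tuple[str, bool, bool]] = []
--     cur_text, cur_b, cur_i = runs[0]
--
--     for text, b, i in runs[1:]:
--         if b == cur_b and i == cur_i:
--             cur_text += text
--         else:
--             groups.append((cur_text, cur_b, cur_i))
--             cur_text, cur_b, cur_i = text, b, i
--     groups.append((cur_text, cur_b, cur_i))
--
--     parts: list[str] = []
--     for text, bold, italic in groups:
--         parts.append(_wrap_style(text, bold=bold, italic=italic))
--     return "".join(parts)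
-- ===== SOURCE B (Python) =====
-- def _wrap_style(text: str, *, bold: bool, italic: bool) -> str:
--     if bold and italic:
--         return f"***{text}***"
--     if bold:
--         return f"**{text}**"
--     if italic:
--         return f"*{text}*"
--     return text
--
-- def _merge_styled_runs(runs):
--     # Span-scan: instead of maintaining a running (text, style) accumulator
--     # that grows text piece by piece, scan forward by index to find each
--     # maximal same-style span [j:k], join and wrap that whole slice at once,
--     # and jump j to k.  No current-run accumulator state is kept.
--     out = []
--     n = len(runs)
--     j = 0
--     while j < n:
--         b, i = runs[j][1], runs[j][2]
--         k = j + 1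
--         while k < n and runs[k][1] == b and runs[k][2] == i:
--             k += 1
--         out.append(_wrap_style("".join(t for t, _, _ in runs[j:k]), bold=b, italic=i))
--         j = k
--     return "".join(out)
-- ===== Notes on version B (the rewrite author's own statement) =====
-- stated objective: alternative
-- what changed: B replaces A's running-accumulator merge (current text grown run by run, then a second wrapping pass over a groups table) with an index-based span scan: it finds each maximal same-style span by advancing an index, joins and wraps that slice in one step, and keeps no current-run state and no intermediate groups list.
import Mathlib
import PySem

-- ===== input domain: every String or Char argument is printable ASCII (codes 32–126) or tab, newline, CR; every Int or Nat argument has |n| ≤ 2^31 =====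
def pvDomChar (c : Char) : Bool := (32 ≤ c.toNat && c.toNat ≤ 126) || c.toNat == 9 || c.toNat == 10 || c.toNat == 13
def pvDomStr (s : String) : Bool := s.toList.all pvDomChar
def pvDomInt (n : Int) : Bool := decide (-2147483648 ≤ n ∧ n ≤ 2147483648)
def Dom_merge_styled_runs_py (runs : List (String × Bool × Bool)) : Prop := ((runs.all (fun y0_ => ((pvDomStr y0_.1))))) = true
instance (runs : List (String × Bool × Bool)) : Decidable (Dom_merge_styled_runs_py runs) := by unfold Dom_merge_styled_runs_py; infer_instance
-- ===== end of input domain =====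

-- B replaces A's running-accumulator merge + second wrapping pass by an index-based span scan
-- that joins and wraps each maximal same-style slice in one step (alternative decomposition).


-- ===== PORT A =====
-- _wrap_style: branch order as in the Python (shared verbatim by both sources)
def wrap_style (text : String) (bold italic : Bool) : String :=
  if bold && italic then "***" ++ text ++ "***"
  else if bold then "**" ++ text ++ "**"
  else if italic then "*" ++ text ++ "*"
  else text

-- one step of A's grouping loop over runs[1:]
def mergeStepA (acc : List (String × Bool × Bool) × String × Bool × Bool)
    (r : String × Bool × Bool) : List (String × Bool × Bool) × String × Bool × Bool :=
  if r.2.1 == acc.2.2.1 && r.2.2 == acc.2.2.2 then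
    (acc.1, acc.2.1 ++ r.1, acc.2.2.1, acc.2.2.2)
  else
    (acc.1 ++ [(acc.2.1, acc.2.2.1, acc.2.2.2)], r.1, r.2.1, r.2.2)

def merge_styled_runs_py (runs : List (String × Bool × Bool)) : String :=
  match runs with
  | [] => ""
  | (t0, b0, i0) :: rest =>
    let st := rest.foldl mergeStepA ([], t0, b0, i0)
    let groups := st.1 ++ [(st.2.1, st.2.2.1, st.2.2.2)]
    let parts := groups.map (fun g => wrap_style g.1 g.2.1 g.2.2)
    String.join parts

-- ===== PORT B =====
-- B's outer while loop over maximal same-style spans: the inner index scan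
-- `while k < n and runs[k][1] == b and runs[k][2] == i` is the takeWhile/dropWhile
-- split of the tail, runs[j:k] joined and wrapped in one step, j jumping to k.
def altLoop : List (String × Bool × Bool) → List String → List String
  | [], out => out
  | (t, b, i) :: rest, out =>
    let p := fun (r : String × Bool × Bool) => r.2.1 == b && r.2.2 == i
    altLoop (rest.dropWhile p)
      (out ++ [wrap_style (String.join (t :: (rest.takeWhile p).map (·.1))) b i])
  termination_by rs _ => rs.length
  decreasing_by
    simp only [List.length_cons]
    exact Nat.lt_succ_of_le (List.length_dropWhile_le _ _)

def merge_styled_runs_py_alt (runs : List (String × Bool × Bool)) : String :=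
  String.join (altLoop runs [])

-- ===== PRECONDITION & SPEC =====
def Spec_merge_styled_runs_py (runs : List (String × Bool × Bool)) (out : String) : Prop := out = merge_styled_runs_py_alt runs
instance (runs : List (String × Bool × Bool)) (out : String) : Decidable (Spec_merge_styled_runs_py runs out) := by unfold Spec_merge_styled_runs_py; infer_instance

-- ===== CLAIM (what is proved, stated in full; the proofs are below) =====
def Claim_equal_merge_styled_runs_py : Prop := ∀ (runs : List (String × Bool × Bool)), Dom_merge_styled_runs_py runs → Spec_merge_styled_runs_py runs (merge_styled_runs_py runs)

-- ===== LEMMAS AND PROOFS =====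

-- the accumulator of B's loop is a pure prefix
theorem altLoop_append : ∀ (n : Nat) (rs : List (String × Bool × Bool)) (out : List String),
    rs.length ≤ n → altLoop rs out = out ++ altLoop rs [] := by
  intro n
  induction n with
  | zero =>
    intro rs out h
    have : rs = [] := List.length_eq_zero_iff.mp (Nat.le_zero.mp h)
    subst this; simp [altLoop]
  | succ n ih =>
    intro rs out h
    match rs with
    | [] => simp [altLoop]
    | (t, b, i) :: rest =>
      simp only [altLoop]
      have hlen : (rest.dropWhile (fun r => r.2.1 == b && r.2.2 == i)).length ≤ n :=
        le_trans (List.length_dropWhile_le _ _)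
          (Nat.le_of_succ_le_succ (by simpa using h))
      simp only [List.nil_append]
      rw [ih _ _ hlen]
      conv_rhs => rw [ih _ _ hlen]
      simp

-- A's fold only appends to its groups list
theorem foldA_prefix (rest : List (String × Bool × Bool)) :
    ∀ (gs : List (String × Bool × Bool)) (ct : String) (cb ci : Bool),
    rest.foldl mergeStepA (gs, ct, cb, ci)
      = (gs ++ (rest.foldl mergeStepA ([], ct, cb, ci)).1,
         (rest.foldl mergeStepA ([], ct, cb, ci)).2) := by
  induction rest with
  | nil => intro gs ct cb ci; simp
  | cons r rs ih =>
    intro gs ct cb ci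
    by_cases h : (r.2.1 == cb && r.2.2 == ci) = true
    · simp only [List.foldl_cons, mergeStepA, h, if_pos]
      exact ih gs (ct ++ r.1) cb ci
    · simp only [List.foldl_cons, mergeStepA, h, if_neg, Bool.false_eq_true, not_false_iff,
        List.nil_append]
      rw [ih (gs ++ [(ct, cb, ci)]) r.1 r.2.1 r.2.2, ih [(ct, cb, ci)] r.1 r.2.1 r.2.2]
      simp

-- String.join over foldl: splitting off the initial accumulator
theorem str_foldl_append (l : List String) : ∀ a : String, l.foldl (· ++ ·) a = a ++ l.foldl (· ++ ·) "" := by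
  induction l with
  | nil => intro a; simp
  | cons x l ih =>
    intro a; simp only [List.foldl_cons]; rw [ih (a ++ x), ih ("" ++ x)]
    simp [String.append_assoc]

theorem join_cons (s : String) (l : List String) : String.join (s :: l) = s ++ String.join l := by
  show List.foldl (· ++ ·) "" (s :: l) = _
  simp only [List.foldl_cons]
  rw [str_foldl_append l ("" ++ s)]
  simp
  rfl

-- rendered A-state = B's span scan started at the current run
theorem main_rel : ∀ (n : Nat) (rest : List (String × Bool × Bool)), rest.length ≤ n →
    ∀ (ct : String) (cb ci : Bool),
    String.join ((((rest.foldl mergeStepA ([], ct, cb, ci)).1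
        ++ [((rest.foldl mergeStepA ([], ct, cb, ci)).2.1,
             (rest.foldl mergeStepA ([], ct, cb, ci)).2.2.1,
             (rest.foldl mergeStepA ([], ct, cb, ci)).2.2.2)]).map
        (fun g => wrap_style g.1 g.2.1 g.2.2)))
      = String.join (altLoop ((ct, cb, ci) :: rest) []) := by
  intro n
  induction n with
  | zero =>
    intro rest h ct cb ci
    have : rest = [] := List.length_eq_zero_iff.mp (Nat.le_zero.mp h)
    subst this; simp [altLoop, String.join]
  | succ n ih =>
    intro rest h ct cb ci
    match rest with
    | [] => simp [altLoop, String.join]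
    | r :: rs =>
      by_cases hp : (r.2.1 == cb && r.2.2 == ci) = true
      · -- same style: A grows the current text; B extends the span
        simp only [List.foldl_cons, mergeStepA, hp, if_pos]
        have hlen : rs.length ≤ n := Nat.le_of_succ_le_succ (by simpa using h)
        rw [ih rs hlen (ct ++ r.1) cb ci]
        -- both sides are now altLoop from states differing only by join-assoc
        simp only [altLoop, List.takeWhile_cons, List.dropWhile_cons, hp]
        simp [String.join]
      · -- style change: A flushes a group; B's span is just the head
        simp only [List.foldl_cons, mergeStepA, hp, if_neg, Bool.false_eq_true, not_false_iff,
          List.nil_append]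
        rw [foldA_prefix rs [(ct, cb, ci)] r.1 r.2.1 r.2.2]
        have hlen : rs.length ≤ n := Nat.le_of_succ_le_succ (by simpa using h)
        have hih := ih rs hlen r.1 r.2.1 r.2.2
        have hRHS : altLoop ((ct, cb, ci) :: r :: rs) []
            = wrap_style (String.join [ct]) cb ci :: altLoop (r :: rs) [] := by
          simp only [altLoop, List.takeWhile_cons, List.dropWhile_cons, hp, Bool.false_eq_true,
            if_false, List.map_nil, List.nil_append]
          rw [altLoop_append (r :: rs).length (r :: rs) _ (le_refl _)]
          simp
        rw [hRHS, join_cons, ← hih]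
        simp [String.join]
        rw [str_foldl_append]
        simp [String.append_assoc]

-- ===== VERDICT (by name: the statement is the Claim_ definition above) =====
theorem merge_styled_runs_py_spec : Claim_equal_merge_styled_runs_py := by
  intro runs _
  unfold Spec_merge_styled_runs_py merge_styled_runs_py merge_styled_runs_py_alt
  match runs with
  | [] => simp [altLoop, String.join]
  | (t0, b0, i0) :: rest =>
    simpa using main_rel rest.length rest (le_refl _) t0 b0 i0
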